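-- pv_equiv track=rewrite | github.com/JaredTully/C200jttully | Assignment9/rec.py | bL
-- ===== SOURCE A (Python) =====
-- def even(x):
--     if (x % 2) == 1:
--         return False
--     else:
--         return True
--
-- def odd(x):
--     if (x % 2) == 0:
--         return False
--     else:
--         return True
--
-- def bL(n):
--     x,y=0,0
--     for i in range(1,n+2):
--         if i == n+1:
--             return y
--         elif i == 1 or i == 2:
--             x,y=x,y
--         elif even(i):
--             x,y=y,y+(i-1)
--         elif odd(i):
--             x,y=y,y+(i**2+1)
-- ===== SOURCE B (Python) =====
-- def bL(n):
--     # Closed-form summation: y = sum over i in [3, n] of (i-1) if i even else (i*i+1).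
--     m = n // 2
--     e = m * m - 1 if n >= 2 else 0          # sum of (i-1) for even i in [4, n]
--     k = (n - 1) // 2                         # number of odd i in [3, n]
--     if k < 0:
--         k = 0
--     o = 4 * k * (k + 1) * (2 * k + 1) // 6 + 2 * k * (k + 1) + 2 * k
--     return e + o
-- ===== Notes on version B (the rewrite author's own statement) =====
-- stated objective: faster
-- what changed: Replaced the O(n) accumulation loop over range(1, n+2) by closed-form arithmetic-series formulas for the even terms (i-1) and odd terms (i*i+1).
-- outside the precondition, e.g. on bL(-1): A returns None, B returns 0
import Mathlib
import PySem

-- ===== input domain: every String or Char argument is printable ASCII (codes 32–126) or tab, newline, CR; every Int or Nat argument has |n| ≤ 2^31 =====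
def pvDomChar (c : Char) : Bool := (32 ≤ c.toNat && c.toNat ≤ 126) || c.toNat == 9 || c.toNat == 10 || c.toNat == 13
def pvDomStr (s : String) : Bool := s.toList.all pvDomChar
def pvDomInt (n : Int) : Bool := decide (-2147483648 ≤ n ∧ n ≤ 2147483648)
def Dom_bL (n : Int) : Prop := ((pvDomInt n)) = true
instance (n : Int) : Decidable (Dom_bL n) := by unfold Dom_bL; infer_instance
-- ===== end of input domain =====

-- B replaces A's O(n) accumulation loop by closed-form summation formulas (O(1)).
-- A returns None (no int) for n < 0 (empty loop falls off the end); Pre_ excludes those inputs.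

-- ===== PORT A =====
-- even(x) of Source A
def pyEvenA (x : Int) : Bool := if PySem.Int.mod x 2 = 1 then false else true
-- odd(x) of Source A
def pyOddA (x : Int) : Bool := if PySem.Int.mod x 2 = 0 then false else true

-- the for-loop of bL with early return; falling off the end (Python: implicit None) yields 0,
-- reached only for n < 0, which Pre_ excludes
def bLLoop (n : Int) : List Int → Int → Int → Int
  | [], _, _ => 0
  | i :: rest, x, y =>
    if i = n + 1 then y
    else if i = 1 ∨ i = 2 then bLLoop n rest x y
    else if pyEvenA i then bLLoop n rest y (y + (i - 1))
    else if pyOddA i then bLLoop n rest y (y + (i ^ 2 + 1))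
    else bLLoop n rest x y

def bL (n : Int) : Int := bLLoop n (PySem.List.pyRange 1 (n + 2) 1) 0 0

-- ===== PORT B =====
def bL_alt (n : Int) : Int :=
  let m := PySem.Int.floordiv n 2
  let e := if n ≥ 2 then m * m - 1 else 0
  let k0 := PySem.Int.floordiv (n - 1) 2
  let k := if k0 < 0 then 0 else k0
  let o := PySem.Int.floordiv (4 * k * (k + 1) * (2 * k + 1)) 6 + 2 * k * (k + 1) + 2 * k
  e + o

-- ===== PRECONDITION & SPEC =====
-- Pre_ excludes n < 0, where A's loop body never runs and A falls off the end returning None (not an int).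
def Pre_bL (n : Int) : Prop := 0 ≤ n
instance (n : Int) : Decidable (Pre_bL n) := by unfold Pre_bL; infer_instance
def pvWitness_bL : Int := 7

def Spec_bL (n : Int) (out : Int) : Prop := out = bL_alt n
instance (n : Int) (out : Int) : Decidable (Spec_bL n out) := by unfold Spec_bL; infer_instance

-- ===== CLAIM (what is proved, stated in full; the proofs are below) =====
def Claim_equal_bL : Prop := ∀ (n : Int), Dom_bL n → Pre_bL n → Spec_bL n (bL n)

-- ===== LEMMAS AND PROOFS =====

-- the term added by A's loop at index i (0 for i ∈ {1,2})
def gTerm (i : Int) : Int :=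
  if i = 1 ∨ i = 2 then 0 else if pyEvenA i then i - 1 else i ^ 2 + 1

-- sum of gTerm over m consecutive integers starting at k
def sTerm : Nat → Int → Int
  | 0, _ => 0
  | m + 1, k => gTerm k + sTerm m (k + 1)

theorem sTerm_succ_right (m : Nat) (k : Int) :
    sTerm (m + 1) k = sTerm m k + gTerm (k + m) := by
  induction m generalizing k with
  | zero => simp [sTerm]
  | succ m ih =>
    rw [show m + 1 + 1 = (m + 1) + 1 from rfl]
    rw [sTerm, ih, sTerm]
    push_cast
    ring_nf

-- the loop, started at position k = n + 1 - m with accumulator y, adds sTerm m k to y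
theorem bLLoop_eq (n : Int) :
    ∀ (m : Nat) (x y : Int), 1 ≤ n + 1 - m →
      bLLoop n (PySem.List.pyRange (n + 1 - m) (n + 2) 1) x y = y + sTerm m (n + 1 - m) := by
  intro m
  induction m with
  | zero =>
    intro x y h
    simp only [Nat.cast_zero, sub_zero] at *
    rw [PySem.List.pyRange_one_cons (by omega)]
    rw [bLLoop]
    simp [sTerm]
  | succ m ih =>
    intro x y h
    rw [PySem.List.pyRange_one_cons (by omega)]
    rw [bLLoop]
    have hne : ¬ (n + 1 - (↑m + 1) = n + 1) := by omega
    have harg : n + 1 - (↑(m + 1) : Int) + 1 = n + 1 - ↑m := by push_cast; ring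
    rw [if_neg (by push_cast at hne ⊢; exact hne)]
    by_cases h12 : n + 1 - (↑(m + 1) : Int) = 1 ∨ n + 1 - (↑(m + 1) : Int) = 2
    · rw [if_pos h12, harg, ih x y (by omega)]
      rw [sTerm, gTerm, if_pos h12, harg]
      ring
    · rw [if_neg h12]
      by_cases hev : pyEvenA (n + 1 - (↑(m + 1) : Int))
      · rw [if_pos hev, harg, ih _ _ (by omega)]
        rw [sTerm, gTerm, if_neg h12, if_pos hev, harg]
        ring
      · rw [if_neg hev]
        have hmeq : PySem.Int.mod (n + 1 - (↑(m + 1) : Int)) 2 =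
            (n + 1 - (↑(m + 1) : Int)) % 2 := PySem.Int.mod_eq_emod_of_pos (by omega)
        have hm1 : (n + 1 - (↑(m + 1) : Int)) % 2 = 1 := by
          unfold pyEvenA at hev
          rw [hmeq] at hev
          by_contra hc
          rw [if_neg hc] at hev
          exact hev rfl
        have hodd : pyOddA (n + 1 - (↑(m + 1) : Int)) = true := by
          unfold pyOddA
          rw [hmeq, hm1]
          norm_num
        rw [if_pos hodd, harg, ih _ _ (by omega)]
        rw [sTerm, gTerm, if_neg h12, if_neg hev, harg]
        ring

theorem three_dvd_prod (k : Int) : (3 : Int) ∣ k * (k + 1) * (2 * k + 1) := by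
  have h : k % 3 = 0 ∨ k % 3 = 1 ∨ k % 3 = 2 := by omega
  have hk : k = 3 * (k / 3) + k % 3 := by omega
  set q := k / 3 with hq
  rcases h with h | h | h
  · exact ⟨q * (3 * q + 1) * (6 * q + 1), by rw [hk, h]; ring⟩
  · exact ⟨(3 * q + 1) * (3 * q + 2) * (2 * q + 1), by rw [hk, h]; ring⟩
  · exact ⟨(3 * q + 2) * (q + 1) * (6 * q + 5), by rw [hk, h]; ring⟩

-- exact value of B's cubic floordiv term
theorem cubic_div (k : Int) :
    4 * k * (k + 1) * (2 * k + 1) / 6 = 2 * (k * (k + 1) * (2 * k + 1) / 3) := by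
  obtain ⟨d, hd⟩ := three_dvd_prod k
  have h6 : 4 * k * (k + 1) * (2 * k + 1) = 6 * (2 * d) := by
    rw [show 4 * k * (k + 1) * (2 * k + 1) = 4 * (k * (k + 1) * (2 * k + 1)) by ring, hd]; ring
  rw [h6, hd]
  rw [Int.mul_ediv_cancel_left _ (by omega : (6 : Int) ≠ 0),
      Int.mul_ediv_cancel_left _ (by omega : (3 : Int) ≠ 0)]

-- B's lets, flattened (definitional)
def altK (n : Int) : Int :=
  if PySem.Int.floordiv (n - 1) 2 < 0 then 0 else PySem.Int.floordiv (n - 1) 2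

theorem bL_alt_eq (n : Int) :
    bL_alt n = (if n ≥ 2 then PySem.Int.floordiv n 2 * PySem.Int.floordiv n 2 - 1 else 0) +
      (PySem.Int.floordiv (4 * altK n * (altK n + 1) * (2 * altK n + 1)) 6 +
        2 * altK n * (altK n + 1) + 2 * altK n) := rfl

-- B satisfies the recurrence bL_alt (n+1) = bL_alt n + gTerm (n+1) for n ≥ 0
theorem bL_alt_step (n : Int) (hn : 0 ≤ n) :
    bL_alt (n + 1) = bL_alt n + gTerm (n + 1) := by
  by_cases hsmall : n < 2
  · have h01 : n = 0 ∨ n = 1 := by omega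
    rcases h01 with rfl | rfl <;> decide
  · rw [bL_alt_eq, bL_alt_eq]
    unfold altK gTerm pyEvenA
    rw [PySem.Int.mod_eq_emod_of_pos (by omega : (0:Int) < 2)]
    rw [PySem.Int.floordiv_eq_ediv_of_pos (a := n) (by omega),
        PySem.Int.floordiv_eq_ediv_of_pos (a := n + 1) (by omega),
        PySem.Int.floordiv_eq_ediv_of_pos (a := n - 1) (by omega),
        PySem.Int.floordiv_eq_ediv_of_pos (a := n + 1 - 1) (by omega)]
    have h12 : ¬ (n + 1 = 1 ∨ n + 1 = 2) := by omega
    rw [if_neg h12, if_pos (by omega : n + 1 ≥ 2), if_pos (by omega : n ≥ 2)]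
    rcases Int.even_or_odd n with ⟨t, ht⟩ | ⟨t, ht⟩
    · -- n = t + t even, n + 1 odd: the new term is (n+1)^2 + 1
      subst ht
      have ht1 : 1 ≤ t := by omega
      have hmod : (t + t + 1) % 2 = 1 := by omega
      rw [hmod]
      rw [show (t + t + 1) / 2 = t by omega, show (t + t) / 2 = t by omega,
          show (t + t - 1) / 2 = t - 1 by omega, show (t + t + 1 - 1) / 2 = t by omega]
      rw [if_neg (by omega : ¬ (t : Int) - 1 < 0), if_neg (by omega : ¬ (t : Int) < 0)]
      norm_num
      have hc2 := cubic_div (t - 1)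
      rw [show (t : Int) - 1 + 1 = t by ring] at hc2
      rw [cubic_div t, hc2]
      obtain ⟨d, hd⟩ := three_dvd_prod t
      obtain ⟨d', hd'⟩ := three_dvd_prod (t - 1)
      rw [show (t : Int) - 1 + 1 = t by ring] at hd'
      rw [hd, hd', Int.mul_ediv_cancel_left _ (by omega : (3 : Int) ≠ 0),
          Int.mul_ediv_cancel_left _ (by omega : (3 : Int) ≠ 0)]
      have key : 3 * (d - d') = 3 * (2 * (t * t)) := by linear_combination hd' - hd
      have key2 : d - d' = 2 * (t * t) := by linarith
      linear_combination 2 * key2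
    · -- n = 2t + 1 odd, n + 1 even: the new term is (n+1) - 1
      subst ht
      have hmod : (2 * t + 1 + 1) % 2 = 0 := by omega
      rw [hmod]
      rw [show (2 * t + 1 + 1) / 2 = t + 1 by omega, show (2 * t + 1) / 2 = t by omega,
          show (2 * t + 1 - 1) / 2 = t by omega, show (2 * t + 1 + 1 - 1) / 2 = t by omega]
      norm_num
      ring

theorem sTerm_eq_alt (m : Nat) : sTerm m 1 = bL_alt (m : Int) := by
  induction m with
  | zero => simp [sTerm]; decide
  | succ m ih =>
    rw [sTerm_succ_right, ih, show (1 : Int) + (m : Int) = (m : Int) + 1 from by ring,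
        show ((m + 1 : Nat) : Int) = (m : Int) + 1 from by push_cast; ring,
        bL_alt_step (m : Int) (Int.natCast_nonneg m)]

-- ===== VERDICT (by name: the statement is the Claim_ definition above) =====
theorem bL_spec : Claim_equal_bL := by
  intro n _ hpre
  have h0 : (0 : Int) ≤ n := hpre
  unfold Spec_bL bL
  obtain ⟨m, rfl⟩ : ∃ m : Nat, (m : Int) = n := ⟨n.toNat, Int.toNat_of_nonneg h0⟩
  have h := bLLoop_eq (m : Int) m 0 0 (by omega)
  rw [show (m : Int) + 1 - (m : Int) = 1 by ring] at h
  rw [h, zero_add, sTerm_eq_alt]
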